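-- pv_equiv track=rewrite | github.com/bnskaggs/Steam_Review_Extractor_and_Evaluator | steam_agent/tools/taxonomy_expander.py | _find_windows
-- ===== SOURCE A (Python) =====
-- from typing import Iterator, Sequence
--
-- WINDOW_RADIUS = 6
--
-- def _find_windows(tokens: list[str], seed_tokens: list[list[str]]) -> Iterator[list[str]]:
--     if not seed_tokens:
--         return
--     length = len(tokens)
--     for seed in seed_tokens:
--         if not seed:
--             continue
--         size = len(seed)
--         for idx in range(length - size + 1):
--             if tokens[idx : idx + size] == seed:
--                 start = max(0, idx - WINDOW_RADIUS)
--                 end = min(length, idx + size + WINDOW_RADIUS)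
--                 yield tokens[start:end]
-- ===== SOURCE B (Python) =====
-- WINDOW_RADIUS = 6
--
--
-- def _find_windows(tokens, seed_tokens):
--     # Index every token's occurrence positions once; each seed is then
--     # verified only at the positions of its first token.
--     pos = {}
--     for i, tok in enumerate(tokens):
--         pos.setdefault(tok, []).append(i)
--     for seed in seed_tokens:
--         if seed:
--             m = len(seed)
--             for i in pos.get(seed[0], []):
--                 if tokens[i:i + m] == seed:
--                     yield tokens[max(0, i - WINDOW_RADIUS): i + m + WINDOW_RADIUS]
-- ===== Notes on version B (the rewrite author's own statement) =====
-- stated objective: alternative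
-- what changed: B builds a one-pass dictionary from token to its occurrence positions and verifies each seed only at the positions of the seed's first token (yielding the clamped window directly), instead of A's full scan of every start index per seed.
import Mathlib
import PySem

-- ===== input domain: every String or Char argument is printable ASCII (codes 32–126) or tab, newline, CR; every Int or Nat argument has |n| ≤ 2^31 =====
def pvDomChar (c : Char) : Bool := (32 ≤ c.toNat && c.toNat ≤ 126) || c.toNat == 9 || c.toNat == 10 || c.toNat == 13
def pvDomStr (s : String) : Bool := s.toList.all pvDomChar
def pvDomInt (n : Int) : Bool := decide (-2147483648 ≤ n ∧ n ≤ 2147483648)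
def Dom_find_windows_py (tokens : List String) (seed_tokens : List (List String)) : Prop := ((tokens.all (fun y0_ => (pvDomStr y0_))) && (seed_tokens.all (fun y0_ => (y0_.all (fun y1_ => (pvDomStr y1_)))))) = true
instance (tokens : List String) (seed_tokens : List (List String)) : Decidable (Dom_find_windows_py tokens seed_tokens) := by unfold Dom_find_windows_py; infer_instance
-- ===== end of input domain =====

-- B replaces A's per-seed full index scan by a one-pass dictionary from token to its
-- occurrence positions, verifying each seed only at the positions of its first token
-- (alternative algorithm; same results in the same order).

-- ===== PORT A =====
def find_windows_py (tokens : List String) (seed_tokens : List (List String)) : List (List String) :=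
  if seed_tokens = [] then [] else
  let length : Int := tokens.length
  seed_tokens.foldl (fun out seed =>
    if seed = [] then out else
    let size : Int := seed.length
    (PySem.List.pyRange 0 (length - size + 1) 1).foldl (fun out idx =>
      if PySem.List.slice tokens (some idx) (some (idx + size)) = seed then
        let start := max 0 (idx - 6)
        let stop := min length (idx + size + 6)
        out ++ [PySem.List.slice tokens (some start) (some stop)]
      else out) out) []

-- ===== PORT B =====
-- pos = {}; for i, tok in enumerate(tokens): pos.setdefault(tok, []).append(i)
def pvIndexDict (tokens : List String) : PySem.Dict String (List Int) :=
  (PySem.List.enumerate tokens 0).foldl (fun d p => d.modify p.2 [] (· ++ [p.1])) PySem.Dict.empty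

-- the inner loop: the windows one seed yields (empty seed yields nothing)
def pvSeedWindows (tokens : List String) (pos : PySem.Dict String (List Int))
    (seed : List String) : List (List String) :=
  match seed with
  | [] => []
  | first :: _ =>
    (pos.getD first []).filterMap (fun i =>
      if PySem.List.slice tokens (some i) (some (i + (seed.length : Int))) = seed then
        some (PySem.List.slice tokens (some (max 0 (i - 6)))
          (some (i + (seed.length : Int) + 6)))
      else none)

def find_windows_py_alt (tokens : List String) (seed_tokens : List (List String)) : List (List String) :=
  seed_tokens.flatMap (pvSeedWindows tokens (pvIndexDict tokens))

-- ===== PRECONDITION & SPEC =====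
def Spec_find_windows_py (tokens : List String) (seed_tokens : List (List String)) (out : List (List String)) : Prop := out = find_windows_py_alt tokens seed_tokens
instance (tokens : List String) (seed_tokens : List (List String)) (out : List (List String)) : Decidable (Spec_find_windows_py tokens seed_tokens out) := by unfold Spec_find_windows_py; infer_instance

-- ===== CLAIM (what is proved, stated in full; the proofs are below) =====
def Claim_equal_find_windows_py : Prop := ∀ (tokens : List String) (seed_tokens : List (List String)), Dom_find_windows_py tokens seed_tokens → Spec_find_windows_py tokens seed_tokens (find_windows_py tokens seed_tokens)

-- ===== LEMMAS AND PROOFS =====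

-- positions of token h in tokens, as B's dictionary stores them
def posList (tokens : List String) (h : String) : List Int :=
  (PySem.List.pyRange 0 (tokens.length : Int) 1).filter
    (fun i => decide (PySem.List.pyGetD tokens i "" = h))

-- invariant of the dictionary-building loop
theorem dict_build_getD (h : String) :
    ∀ (xs : List String) (s : Int) (d : PySem.Dict String (List Int)),
      ((PySem.List.enumerate xs s).foldl (fun d p => d.modify p.2 [] (· ++ [p.1])) d).getD h []
        = d.getD h [] ++ (PySem.List.enumerate xs s).filterMap (fun p => if p.2 = h then some p.1 else none)
  | [], s, d => by simp [PySem.List.enumerate_nil]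
  | x :: xs, s, d => by
    rw [PySem.List.enumerate_cons]
    simp only [List.foldl_cons, List.filterMap_cons]
    rw [dict_build_getD h xs (s + 1) (d.modify x [] (· ++ [s]))]
    by_cases hx : x = h
    · subst hx; simp [PySem.Dict.getD_modify_self]
    · rw [PySem.Dict.getD_modify_of_ne]
      · simp [hx]
      · exact fun hh => hx hh.symm

theorem filterMap_if_eq_filter (p : Int → Bool) (l : List Int) :
    l.filterMap (fun j => if p j then some j else none) = l.filter p := by
  induction l with
  | nil => rfl
  | cons a l ih => by_cases hp : p a <;> simp [hp, ih]

theorem pos_getD (tokens : List String) (h : String) :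
    (pvIndexDict tokens).getD h [] = posList tokens h := by
  unfold pvIndexDict
  rw [dict_build_getD h tokens 0 PySem.Dict.empty]
  rw [PySem.List.enumerate_eq_map_pyRange tokens ""]
  rw [List.filterMap_map]
  have : ((fun p : Int × String => if p.2 = h then some p.1 else none) ∘
      (fun j => (j, PySem.List.pyGetD tokens j "")))
      = fun j : Int => if decide (PySem.List.pyGetD tokens j "" = h) then some j else none := by
    funext j; by_cases hj : PySem.List.pyGetD tokens j "" = h <;> simp [hj]
  rw [this, filterMap_if_eq_filter]
  simp [posList]

-- B's inner filterMap as filter-then-map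
theorem filterMap_if_eq_filter_map {β : Type} (p : Int → Prop) [DecidablePred p] (f : Int → β) (l : List Int) :
    l.filterMap (fun j => if p j then some (f j) else none) = (l.filter (fun j => decide (p j))).map f := by
  induction l with
  | nil => rfl
  | cons a l ih => by_cases hp : p a <;> simp [hp, ih]

-- a match at i within bounds pins the head token
theorem match_head (tokens : List String) (first : String) (rest : List String)
    (i : Int) (h0 : 0 ≤ i) (hlt : i < (tokens.length : Int))
    (hm : PySem.List.slice tokens (some i) (some (i + ((rest.length : Int) + 1))) = first :: rest) :
    PySem.List.pyGetD tokens i "" = first := by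
  obtain ⟨k, rfl⟩ := Int.eq_ofNat_of_zero_le h0
  have hk : k < tokens.length := by exact_mod_cast hlt
  have e1 : ((k : Int) + ((rest.length : Int) + 1)) = ((k : Int) + ((rest.length + 1 : Nat) : Int)) := by
    push_cast; ring
  rw [e1, PySem.List.slice_natCast_add, List.drop_eq_getElem_cons hk, List.take_succ_cons] at hm
  obtain ⟨h1, -⟩ := List.cons.inj hm
  rw [PySem.List.pyGetD_eq_getElem tokens (i := (k : Int)) "" (by omega) (by omega)]
  exact h1

-- a match at i forces i + size ≤ length (the slice would otherwise be too short)
theorem match_bound (tokens : List String) (first : String) (rest : List String)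
    (i : Int) (h0 : 0 ≤ i)
    (hm : PySem.List.slice tokens (some i) (some (i + ((rest.length : Int) + 1))) = first :: rest) :
    i + ((rest.length : Int) + 1) ≤ (tokens.length : Int) := by
  obtain ⟨k, rfl⟩ := Int.eq_ofNat_of_zero_le h0
  have e1 : ((k : Int) + ((rest.length : Int) + 1)) = ((k : Int) + ((rest.length + 1 : Nat) : Int)) := by
    push_cast; ring
  rw [e1, PySem.List.slice_natCast_add] at hm
  have hlen := congrArg List.length hm
  simp [List.length_take, List.length_drop] at hlen
  omega

-- a slice whose end is past the length is unchanged by clamping the end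
theorem slice_min_end (tokens : List String) (s e : Int) (hs : 0 ≤ s) (he : 0 ≤ e) :
    PySem.List.slice tokens (some s) (some (min (tokens.length : Int) e))
      = PySem.List.slice tokens (some s) (some e) := by
  by_cases h : e ≤ (tokens.length : Int)
  · rw [min_eq_right h]
  · rw [not_le] at h
    rw [min_eq_left (le_of_lt h)]
    rw [PySem.List.slice_toNat tokens hs (by positivity), PySem.List.slice_toNat tokens hs he]
    have hlen : (tokens.drop s.toNat).length ≤ (tokens.length : Int).toNat - s.toNat := by
      simp [List.length_drop]
    rw [List.take_of_length_le (by omega), List.take_of_length_le (by omega)]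

-- per-seed window lists agree
theorem seed_lists (tokens : List String) (first : String) (rest : List String) :
    ((PySem.List.pyRange 0 ((tokens.length : Int) - ((rest.length : Int) + 1) + 1) 1).foldl
      (fun out idx =>
        if PySem.List.slice tokens (some idx) (some (idx + ((rest.length : Int) + 1))) = first :: rest then
          out ++ [PySem.List.slice tokens (some (max 0 (idx - 6)))
            (some (min (tokens.length : Int) (idx + ((rest.length : Int) + 1) + 6)))]
        else out) [])
    = pvSeedWindows tokens (pvIndexDict tokens) (first :: rest) := by
  set n : Int := (tokens.length : Int) with hn
  set size : Int := (rest.length : Int) + 1 with hsize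
  rw [PySem.List.foldl_append_ite
    (p := fun idx => PySem.List.slice tokens (some idx) (some (idx + size)) = first :: rest)
    (f := fun idx => PySem.List.slice tokens (some (max 0 (idx - 6)))
      (some (min n (idx + size + 6))))]
  unfold pvSeedWindows
  simp only []
  rw [pos_getD tokens first]
  have hlen : ((first :: rest).length : Int) = size := by
    rw [hsize]; push_cast [List.length_cons]; ring
  rw [hlen]
  rw [filterMap_if_eq_filter_map
    (p := fun i => PySem.List.slice tokens (some i) (some (i + size)) = first :: rest)
    (f := fun i => PySem.List.slice tokens (some (max 0 (i - 6))) (some (i + size + 6)))]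
  rw [List.nil_append]
  rw [posList, List.filter_filter]
  -- the combined B-side filter over [0, n) equals A's filter over [0, n - size + 1)
  have hfilters :
      (PySem.List.pyRange 0 n 1).filter
        (fun i => decide (PySem.List.slice tokens (some i) (some (i + size)) = first :: rest) &&
          decide (PySem.List.pyGetD tokens i "" = first))
      = (PySem.List.pyRange 0 (n - size + 1) 1).filter
        (fun i => decide (PySem.List.slice tokens (some i) (some (i + size)) = first :: rest)) := by
    by_cases hm : n - size + 1 ≤ 0
    · rw [PySem.List.pyRange_one_eq_nil hm]
      apply List.filter_eq_nil_iff.mpr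
      intro i hi
      have hmem := (PySem.List.mem_pyRange_one).mp hi
      simp only [Bool.and_eq_true, decide_eq_true_eq, not_and]
      intro hsl _
      have := match_bound tokens first rest i hmem.1 (by rw [← hsize]; exact hsl)
      rw [← hsize] at this
      omega
    · rw [not_le] at hm
      have h0m : (0 : Int) ≤ n - size + 1 := by omega
      have hmn : n - size + 1 ≤ n := by rw [hsize]; omega
      rw [PySem.List.pyRange_one_append 0 (n - size + 1) n h0m hmn, List.filter_append]
      have htail : (PySem.List.pyRange (n - size + 1) n 1).filter
          (fun i => decide (PySem.List.slice tokens (some i) (some (i + size)) = first :: rest) &&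
            decide (PySem.List.pyGetD tokens i "" = first)) = [] := by
        apply List.filter_eq_nil_iff.mpr
        intro i hi
        have hmem := (PySem.List.mem_pyRange_one).mp hi
        simp only [Bool.and_eq_true, decide_eq_true_eq, not_and]
        intro hsl _
        have h0 : (0 : Int) ≤ i := by omega
        have := match_bound tokens first rest i h0 (by rw [← hsize]; exact hsl)
        rw [← hsize] at this
        omega
      rw [htail, List.append_nil]
      apply List.filter_congr
      intro i hi
      have hmem := (PySem.List.mem_pyRange_one).mp hi
      rw [Bool.eq_iff_iff]
      simp only [Bool.and_eq_true, decide_eq_true_eq]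
      constructor
      · rintro ⟨hsl, -⟩; exact hsl
      · intro hsl
        refine ⟨hsl, ?_⟩
        exact match_head tokens first rest i hmem.1 (by omega)
          (by rw [← hsize]; exact hsl)
  rw [hfilters]
  apply List.map_congr_left
  intro i hi
  have hmem := (PySem.List.mem_pyRange_one).mp (List.mem_of_mem_filter hi)
  exact slice_min_end tokens (max 0 (i - 6)) (i + size + 6)
    (le_max_left 0 _) (by rw [hsize]; omega)

-- A's nested fold, seed by seed, appends exactly B's per-seed windows
theorem outer_fold (tokens : List String) :
    ∀ (seeds : List (List String)) (out : List (List String)),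
      seeds.foldl (fun out seed =>
        if seed = [] then out else
        (PySem.List.pyRange 0 ((tokens.length : Int) - (seed.length : Int) + 1) 1).foldl
          (fun out idx =>
            if PySem.List.slice tokens (some idx) (some (idx + (seed.length : Int))) = seed then
              out ++ [PySem.List.slice tokens (some (max 0 (idx - 6)))
                (some (min (tokens.length : Int) (idx + (seed.length : Int) + 6)))]
            else out) out) out
      = out ++ seeds.flatMap (pvSeedWindows tokens (pvIndexDict tokens))
  | [], out => by simp
  | seed :: seeds, out => by
    rw [List.foldl_cons, List.flatMap_cons, outer_fold tokens seeds]
    match seed with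
    | [] => simp [pvSeedWindows]
    | first :: rest =>
      rw [if_neg (by simp)]
      have hlen : (((first :: rest).length : Int)) = (rest.length : Int) + 1 := by
        push_cast [List.length_cons]; ring
      rw [hlen]
      rw [PySem.List.foldl_append_ite
        (p := fun idx => PySem.List.slice tokens (some idx) (some (idx + ((rest.length : Int) + 1))) = first :: rest)
        (f := fun idx => PySem.List.slice tokens (some (max 0 (idx - 6)))
          (some (min (tokens.length : Int) (idx + ((rest.length : Int) + 1) + 6))))]
      rw [← seed_lists tokens first rest]
      rw [PySem.List.foldl_append_ite
        (p := fun idx => PySem.List.slice tokens (some idx) (some (idx + ((rest.length : Int) + 1))) = first :: rest)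
        (f := fun idx => PySem.List.slice tokens (some (max 0 (idx - 6)))
          (some (min (tokens.length : Int) (idx + ((rest.length : Int) + 1) + 6))))]
      rw [List.append_assoc, List.nil_append]

-- equality of the two ports on all inputs
theorem ports_eq (tokens : List String) (seed_tokens : List (List String)) :
    find_windows_py tokens seed_tokens = find_windows_py_alt tokens seed_tokens := by
  unfold find_windows_py find_windows_py_alt
  by_cases hs : seed_tokens = []
  · simp [hs]
  · simp only [if_neg hs]
    rw [outer_fold tokens seed_tokens []]
    simp

-- ===== VERDICT (by name: the statement is the Claim_ definition above) =====
theorem find_windows_py_spec : Claim_equal_find_windows_py := by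
  intro tokens seed_tokens _
  unfold Spec_find_windows_py
  exact ports_eq tokens seed_tokens
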